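-- pv_equiv track=rewrite | github.com/conan48/telnet-command-test-tool | MyProject/telnet_app/telnet_gui.py | parse_telnet_output
-- ===== SOURCE A (Python) =====
-- def parse_telnet_output(output):
--     """
--     解析 Telnet 命令的输出，提取 data_val 和 result_val
--     假设输出包含 'data: <value>' 和 'result: <value>' 这样的行
--     """
--     data_val = ""
--     result_val = ""
--
--     for line in output.splitlines():
--         line = line.strip()
--         if line.lower().startswith("data:"):
--             data_val = line[len("data:"):].strip()
--         elif line.lower().startswith("result:"):
--             result_val = line[len("result:"):].strip()
--
--     return data_val, result_val
-- ===== SOURCE B (Python) =====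
-- def parse_telnet_output(output):
--     """
--     解析 Telnet 命令的输出，提取 data_val 和 result_val
--     扫描方向相反：从最后一行向前找第一个 data:/result: 行（即最后一次出现），
--     两者都找到后立即停止。
--     """
--     data_val = ""
--     result_val = ""
--     data_found = False
--     result_found = False
--
--     for line in reversed(output.splitlines()):
--         s = line.strip()
--         if not data_found and s.lower().startswith("data:"):
--             data_val = s[len("data:"):].strip()
--             data_found = True
--         elif not result_found and s.lower().startswith("result:"):
--             result_val = s[len("result:"):].strip()
--             result_found = True
--         if data_found and result_found:
--             break
--
--     return data_val, result_val
-- ===== Notes on version B (the rewrite author's own statement) =====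
-- stated objective: alternative
-- what changed: B scans the lines back-to-front with found-flags and an early break at the first match from the end of each prefix (i.e. the last occurrence), instead of A's forward pass that keeps overwriting the values.
import Mathlib
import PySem

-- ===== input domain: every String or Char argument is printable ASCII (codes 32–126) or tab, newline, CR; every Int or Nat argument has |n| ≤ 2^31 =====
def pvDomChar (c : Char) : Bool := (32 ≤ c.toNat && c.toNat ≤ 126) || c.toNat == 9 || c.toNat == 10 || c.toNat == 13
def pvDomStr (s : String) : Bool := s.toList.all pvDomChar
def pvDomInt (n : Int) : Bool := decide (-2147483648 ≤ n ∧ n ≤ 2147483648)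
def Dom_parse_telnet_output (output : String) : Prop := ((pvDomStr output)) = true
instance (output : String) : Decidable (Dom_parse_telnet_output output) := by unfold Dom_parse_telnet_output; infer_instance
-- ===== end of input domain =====

-- B scans the lines back-to-front with found-flags and an early break; return value equal to A's forward overwrite pass.
-- ===== PORT A =====
def parse_telnet_output (output : String) : String × String :=
  (PySem.Str.splitlines output).foldl
    (fun acc line0 =>
      let line := PySem.Str.strip line0
      if PySem.Str.startswith (PySem.Str.lower line) "data:" then
        (PySem.Str.strip (PySem.Str.slice line (some 5) none), acc.2)
      else if PySem.Str.startswith (PySem.Str.lower line) "result:" then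
        (acc.1, PySem.Str.strip (PySem.Str.slice line (some 7) none))
      else acc)
    ("", "")

-- ===== PORT B =====
-- the reversed for-loop of Source B, with its found-flags and early break
def pvLoopB : List String → String → String → Bool → Bool → String × String
  | [], d, r, _, _ => (d, r)
  | line0 :: rest, d, r, df, rf =>
    let s := PySem.Str.strip line0
    let st :=
      if !df && PySem.Str.startswith (PySem.Str.lower s) "data:" then
        (PySem.Str.strip (PySem.Str.slice s (some 5) none), r, true, rf)
      else if !rf && PySem.Str.startswith (PySem.Str.lower s) "result:" then
        (d, PySem.Str.strip (PySem.Str.slice s (some 7) none), df, true)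
      else (d, r, df, rf)
    if st.2.2.1 && st.2.2.2 then (st.1, st.2.1)
    else pvLoopB rest st.1 st.2.1 st.2.2.1 st.2.2.2

def parse_telnet_output_alt (output : String) : String × String :=
  pvLoopB (PySem.Str.splitlines output).reverse "" "" false false

-- ===== PRECONDITION & SPEC =====
def Spec_parse_telnet_output (output : String) (out : String × String) : Prop := out = parse_telnet_output_alt output
instance (output : String) (out : String × String) : Decidable (Spec_parse_telnet_output output out) := by unfold Spec_parse_telnet_output; infer_instance

-- ===== CLAIM (what is proved, stated in full; the proofs are below) =====
def Claim_equal_parse_telnet_output : Prop := ∀ (output : String), Dom_parse_telnet_output output → Spec_parse_telnet_output output (parse_telnet_output output)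

-- ===== LEMMAS AND PROOFS =====

-- whether a line, after stripping and lowering, starts with prefix p
def pvMatch (p : String) (line : String) : Bool :=
  PySem.Str.startswith (PySem.Str.lower (PySem.Str.strip line)) p

-- the value a matching line contributes: strip(line)[n:].strip()
def pvExtract (n : Int) (line : String) : String :=
  PySem.Str.strip (PySem.Str.slice (PySem.Str.strip line) (some n) none)

-- value of the first p-matching line of ls, if any
def pvFirst (p : String) (n : Int) (ls : List String) : Option String :=
  (ls.find? (pvMatch p)).map (pvExtract n)

-- a char list cannot start with both "data:" and "result:"
theorem chars_excl (cs : List Char) (h : PySem.Chars.startswith cs "data:".toList = true) :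
    PySem.Chars.startswith cs "result:".toList = false := by
  have h1 : "data:".toList = ['d','a','t','a',':'] := rfl
  have h2 : "result:".toList = ['r','e','s','u','l','t',':'] := rfl
  rw [h1] at h; rw [h2]
  rcases cs with _ | ⟨c, t⟩ <;>
    simp_all [PySem.Chars.startswith, List.isPrefixOf]
  intro hr
  rw [← hr] at h
  exact absurd h.1 (by decide)

-- a stripped-lowered line cannot start with both "data:" and "result:"
theorem pvMatch_excl (line : String) (h : pvMatch "data:" line = true) :
    pvMatch "result:" line = false := by
  unfold pvMatch at *
  simp only [PySem.Str.startswith_eq] at *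
  exact chars_excl _ h

def pvStepA (acc : String × String) (line0 : String) : String × String :=
  let line := PySem.Str.strip line0
  if PySem.Str.startswith (PySem.Str.lower line) "data:" then
    (PySem.Str.strip (PySem.Str.slice line (some 5) none), acc.2)
  else if PySem.Str.startswith (PySem.Str.lower line) "result:" then
    (acc.1, PySem.Str.strip (PySem.Str.slice line (some 7) none))
  else acc

theorem pvStepA_eq (acc : String × String) (x : String) :
    pvStepA acc x =
      if pvMatch "data:" x then (pvExtract 5 x, acc.2)
      else if pvMatch "result:" x then (acc.1, pvExtract 7 x) else acc := rfl

theorem pvFirst_cons_pos (p : String) (n : Int) (x : String) (t : List String)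
    (h : pvMatch p x = true) : pvFirst p n (x :: t) = some (pvExtract n x) := by
  simp [pvFirst, List.find?_cons, h]

theorem pvFirst_cons_neg (p : String) (n : Int) (x : String) (t : List String)
    (h : pvMatch p x = false) : pvFirst p n (x :: t) = pvFirst p n t := by
  simp [pvFirst, List.find?_cons, h]

-- characterization of A's forward fold: last match = first match of the reversed list
theorem afold_char (ls : List String) (d r : String) :
    ls.foldl pvStepA (d, r) =
      ((pvFirst "data:" 5 ls.reverse).getD d, (pvFirst "result:" 7 ls.reverse).getD r) := by
  induction ls generalizing d r with
  | nil => simp [pvFirst]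
  | cons x t ih =>
    simp only [List.foldl_cons, List.reverse_cons]
    rw [ih, pvStepA_eq]
    have hfd : pvFirst "data:" 5 (t.reverse ++ [x]) =
        (pvFirst "data:" 5 t.reverse).or (pvFirst "data:" 5 [x]) := by
      simp [pvFirst, List.find?_append, Option.map_or]
    have hfr : pvFirst "result:" 7 (t.reverse ++ [x]) =
        (pvFirst "result:" 7 t.reverse).or (pvFirst "result:" 7 [x]) := by
      simp [pvFirst, List.find?_append, Option.map_or]
    rw [hfd, hfr]
    by_cases hd : pvMatch "data:" x = true
    · have hr := pvMatch_excl x hd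
      rw [if_pos hd, pvFirst_cons_pos _ _ _ _ hd, pvFirst_cons_neg _ _ _ _ hr]
      simp [pvFirst]
    · rw [if_neg (by simp [hd]), pvFirst_cons_neg _ _ _ _ (by simpa using hd)]
      by_cases hr : pvMatch "result:" x = true
      · rw [if_pos hr, pvFirst_cons_pos _ _ _ _ hr]
        simp [pvFirst]
      · rw [if_neg (by simp [hr]), pvFirst_cons_neg _ _ _ _ (by simpa using hr)]
        simp [pvFirst]

-- one unfolding of pvLoopB, phrased through pvMatch/pvExtract (definitional)
theorem pvLoopB_cons (x : String) (t : List String) (d r : String) (df rf : Bool) :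
    pvLoopB (x :: t) d r df rf =
      (let st :=
        if !df && pvMatch "data:" x then (pvExtract 5 x, r, true, rf)
        else if !rf && pvMatch "result:" x then (d, pvExtract 7 x, df, true)
        else (d, r, df, rf)
      if st.2.2.1 && st.2.2.2 then (st.1, st.2.1)
      else pvLoopB t st.1 st.2.1 st.2.2.1 st.2.2.2) := rfl

-- characterization of B's reverse loop with flags
theorem bloop_char (ls : List String) (d r : String) (df rf : Bool) :
    pvLoopB ls d r df rf =
      ((if df then d else (pvFirst "data:" 5 ls).getD d),
       (if rf then r else (pvFirst "result:" 7 ls).getD r)) := by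
  induction ls generalizing d r df rf with
  | nil => simp [pvLoopB, pvFirst]
  | cons x t ih =>
    rw [pvLoopB_cons]
    by_cases hdm : pvMatch "data:" x = true
    · have hrm := pvMatch_excl x hdm
      rw [pvFirst_cons_pos _ _ _ _ hdm, pvFirst_cons_neg _ _ _ _ hrm]
      cases df with
      | true =>
        simp only [Bool.not_true, Bool.false_and, Bool.false_eq_true, if_neg, hrm,
          Bool.and_false, if_true]
        cases rf with
        | true => simp
        | false => rw [ih]; simp
      | false =>
        simp only [Bool.not_false, Bool.true_and, hdm, if_pos]
        cases rf with
        | true => simp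
        | false => rw [ih]; simp
    · have hdm' : pvMatch "data:" x = false := by simpa using hdm
      rw [pvFirst_cons_neg _ _ _ _ hdm']
      by_cases hrm : pvMatch "result:" x = true
      · rw [pvFirst_cons_pos _ _ _ _ hrm]
        cases rf with
        | true =>
          simp only [hdm', Bool.and_false, Bool.false_eq_true, if_neg, Bool.not_true,
            Bool.false_and, Bool.and_true]
          cases df with
          | true => simp
          | false => rw [ih]; simp
        | false =>
          simp only [hdm', Bool.and_false, Bool.false_eq_true, if_neg, Bool.not_false,
            Bool.true_and, hrm, if_pos, Bool.and_true]
          cases df with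
          | true => simp
          | false => rw [ih]; simp
      · have hrm' : pvMatch "result:" x = false := by simpa using hrm
        rw [pvFirst_cons_neg _ _ _ _ hrm']
        simp only [hdm', hrm', Bool.and_false, Bool.false_eq_true, if_neg, if_false]
        by_cases hbr : (df && rf) = true
        · have hdf : df = true := by simp_all
          have hrf : rf = true := by simp_all
          simp [hdf, hrf]
        · rw [if_neg hbr]
          exact ih d r df rf

-- ===== VERDICT (by name: the statement is the Claim_ definition above) =====
theorem parse_telnet_output_spec : Claim_equal_parse_telnet_output := by
  intro output _
  unfold Spec_parse_telnet_output parse_telnet_output parse_telnet_output_alt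
  have hA : (PySem.Str.splitlines output).foldl
        (fun acc line0 =>
          let line := PySem.Str.strip line0
          if PySem.Str.startswith (PySem.Str.lower line) "data:" then
            (PySem.Str.strip (PySem.Str.slice line (some 5) none), acc.2)
          else if PySem.Str.startswith (PySem.Str.lower line) "result:" then
            (acc.1, PySem.Str.strip (PySem.Str.slice line (some 7) none))
          else acc) ("", "") =
      (PySem.Str.splitlines output).foldl pvStepA ("", "") := rfl
  rw [hA, afold_char, bloop_char]
  simp
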